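-- pv_equiv track=rewrite | github.com/NickWC/BMCTester | testmethod/methodfunc.py | DiffExpectResult
-- ===== SOURCE A (Python) =====
-- def StrToIntArray(str):
--     str_tmp = ""
--     value = []
--     str = str.strip()
--     strlen = len(str)
--     for i in range(0, strlen):
--         if " " == str[i]:
--             value.append(int(str_tmp,16))
--             str_tmp = ""
--         else:
--             str_tmp = str_tmp + str[i]
--             if i == strlen-1:
--                 value.append(int(str_tmp,16))
--     return value
--
-- def DiffExpectResult(output, expect):
--     cmpStr = ""
--     cmpState = 0
--     outputVal = StrToIntArray(output)
--     expectVal = StrToIntArray(expect)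
--     outputLen = len(outputVal)
--     expectLen = len(expectVal)
--     if outputLen <= expectLen:
--         for i in range(0, expectLen):
--             if i >= outputLen:
--                 cmpStr = cmpStr + "(" + format(expectVal[i], "02x") + ") "
--                 cmpState = 1
--             else:
--                 if outputVal[i] == expectVal[i]:
--                     cmpStr = cmpStr + format(outputVal[i], "02x") + " "
--                 else:
--                     cmpStr = cmpStr + format(outputVal[i], "02x") + "(" + format(expectVal[i], '02x') + ") "
--                     cmpState = 1
--     else:
--         for i in range(0, outputLen):
--             if i >= expectLen:
--                 cmpStr = cmpStr + format(outputVal[i], "02x") + "(N/A) "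
--                 cmpState = 1
--             else:
--                 if outputVal[i] == expectVal[i]:
--                     cmpStr = cmpStr + format(outputVal[i], "02x") + " "
--                 else:
--                     cmpStr = cmpStr + format(outputVal[i], "02x") + "(" + format(expectVal[i], '02x') + ") "
--                     cmpState = 1
--     return cmpStr, cmpState
-- ===== SOURCE B (Python) =====
-- from itertools import zip_longest
--
--
-- def StrToIntArray(str):
--     str_tmp = ""
--     value = []
--     str = str.strip()
--     strlen = len(str)
--     for i in range(0, strlen):
--         if " " == str[i]:
--             value.append(int(str_tmp, 16))
--             str_tmp = ""
--         else:
--             str_tmp = str_tmp + str[i]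
--             if i == strlen - 1:
--                 value.append(int(str_tmp, 16))
--     return value
--
--
-- def DiffExpectResult(output, expect):
--     parts = []
--     for o, e in zip_longest(StrToIntArray(output), StrToIntArray(expect)):
--         if o is None:
--             parts.append("(" + format(e, "02x") + ") ")
--         elif e is None:
--             parts.append(format(o, "02x") + "(N/A) ")
--         elif o == e:
--             parts.append(format(o, "02x") + " ")
--         else:
--             parts.append(format(o, "02x") + "(" + format(e, "02x") + ") ")
--     # a part carries '(' exactly when it marks a difference
--     state = 1 if any("(" in p for p in parts) else 0
--     return "".join(parts), state
-- ===== Notes on version B (the rewrite author's own statement) =====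
-- stated objective: idiomatic
-- what changed: B replaces A's two duplicated length-based index loops over range() by a single pass over itertools.zip_longest pairs collected into a parts list joined at the end, with the diff flag derived from the emitted parts ('(' marks a difference) instead of a mutable state variable set in four branches.
import Mathlib
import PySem

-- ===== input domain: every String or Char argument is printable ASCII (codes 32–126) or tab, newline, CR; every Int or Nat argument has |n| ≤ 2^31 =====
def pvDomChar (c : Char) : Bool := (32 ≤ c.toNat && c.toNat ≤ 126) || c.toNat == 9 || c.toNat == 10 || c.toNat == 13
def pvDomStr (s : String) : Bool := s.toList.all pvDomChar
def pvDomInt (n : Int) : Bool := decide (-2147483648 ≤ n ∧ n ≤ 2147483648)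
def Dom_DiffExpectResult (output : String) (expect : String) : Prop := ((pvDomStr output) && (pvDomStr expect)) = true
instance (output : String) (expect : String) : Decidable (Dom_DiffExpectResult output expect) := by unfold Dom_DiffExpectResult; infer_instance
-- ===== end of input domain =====

-- B replaces A's two length-based index loops by one pass over zip_longest pairs joined at the end,
-- with the diff flag read off the emitted parts (objective: idiomatic / different decomposition).


-- ===== PORT A =====
-- helpers shared verbatim by both Pythons: StrToIntArray (identical in Source A and Source B) and format(v, "02x")

-- hex digits of n (most significant first), [] for 0
def toHexRec : Nat → List Char
  | 0 => []
  | n+1 => toHexRec ((n+1)/16) ++ [Nat.digitChar ((n+1) % 16)]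
decreasing_by exact Nat.div_lt_self (Nat.succ_pos n) (by norm_num)

-- exact port of format(v, "02x"): lowercase hex, zero-padded to width 2, sign in front
def fmt02x (v : Int) : List Char :=
  PySem.Chars.zfill ((if v < 0 then ['-'] else []) ++ (if v.natAbs = 0 then ['0'] else toHexRec v.natAbs)) 2

-- literal port of StrToIntArray; `none` exactly where int(str_tmp, 16) raises ValueError
def strToIntArray (s : String) : Option (List Int) :=
  let cs := PySem.Chars.strip s.toList
  let n := cs.length
  ((List.range n).foldl
    (fun acc i => acc.bind (fun st =>
      let c := cs.getD i ' '        -- str[i], i always in range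
      if c = ' ' then
        (PySem.Int.ofCharsBase? st.1 16).map (fun v => (([] : List Char), st.2 ++ [v]))
      else
        let tmp := st.1 ++ [c]
        if i = n - 1 then (PySem.Int.ofCharsBase? tmp 16).map (fun v => (tmp, st.2 ++ [v]))
        else some (tmp, st.2)))
    (some ([], []))).map (·.2)

-- the two per-index loop bodies of A (cmpStr as List Char, cmpState as Int)
def stepLE (outputVal expectVal : List Int) (st : List Char × Int) (i : Nat) : List Char × Int :=
  if outputVal.length ≤ i then
    (st.1 ++ '(' :: fmt02x (expectVal.getD i 0) ++ [')', ' '], 1)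
  else if outputVal.getD i 0 = expectVal.getD i 0 then
    (st.1 ++ fmt02x (outputVal.getD i 0) ++ [' '], st.2)
  else
    (st.1 ++ fmt02x (outputVal.getD i 0) ++ '(' :: fmt02x (expectVal.getD i 0) ++ [')', ' '], 1)

def stepGT (outputVal expectVal : List Int) (st : List Char × Int) (i : Nat) : List Char × Int :=
  if expectVal.length ≤ i then
    (st.1 ++ fmt02x (outputVal.getD i 0) ++ ['(', 'N', '/', 'A', ')', ' '], 1)
  else if outputVal.getD i 0 = expectVal.getD i 0 then
    (st.1 ++ fmt02x (outputVal.getD i 0) ++ [' '], st.2)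
  else
    (st.1 ++ fmt02x (outputVal.getD i 0) ++ '(' :: fmt02x (expectVal.getD i 0) ++ [')', ' '], 1)

def DiffExpectResult (output : String) (expect : String) : String × Int :=
  match strToIntArray output, strToIntArray expect with
  | some outputVal, some expectVal =>
    let r :=
      if outputVal.length ≤ expectVal.length then
        (List.range expectVal.length).foldl (stepLE outputVal expectVal) ([], 0)
      else
        (List.range outputVal.length).foldl (stepGT outputVal expectVal) ([], 0)
    (String.ofList r.1, r.2)
  | _, _ => ("", 0)   -- Python A raises ValueError here; excluded by Pre_

-- ===== PORT B =====
-- Source B carries its own verbatim copy of StrToIntArray and uses format(v, "02x") too;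
-- B's port gets its own copies of those helpers.
def toHexRecB : Nat → List Char
  | 0 => []
  | n+1 => toHexRecB ((n+1)/16) ++ [Nat.digitChar ((n+1) % 16)]
decreasing_by exact Nat.div_lt_self (Nat.succ_pos n) (by norm_num)

def fmt02xB (v : Int) : List Char :=
  PySem.Chars.zfill ((if v < 0 then ['-'] else []) ++ (if v.natAbs = 0 then ['0'] else toHexRecB v.natAbs)) 2

def strToIntArrayB (s : String) : Option (List Int) :=
  let cs := PySem.Chars.strip s.toList
  let n := cs.length
  ((List.range n).foldl
    (fun acc i => acc.bind (fun st =>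
      let c := cs.getD i ' '        -- str[i], i always in range
      if c = ' ' then
        (PySem.Int.ofCharsBase? st.1 16).map (fun v => (([] : List Char), st.2 ++ [v]))
      else
        let tmp := st.1 ++ [c]
        if i = n - 1 then (PySem.Int.ofCharsBase? tmp 16).map (fun v => (tmp, st.2 ++ [v]))
        else some (tmp, st.2)))
    (some ([], []))).map (·.2)

def zipLongest : List Int → List Int → List (Option Int × Option Int)
  | [], [] => []
  | o :: os, [] => (some o, none) :: zipLongest os []
  | [], e :: es => (none, some e) :: zipLongest [] es
  | o :: os, e :: es => (some o, some e) :: zipLongest os es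

def pieceB : Option Int × Option Int → List Char
  | (none, some e) => '(' :: fmt02xB e ++ [')', ' ']
  | (some o, none) => fmt02xB o ++ ['(', 'N', '/', 'A', ')', ' ']
  | (some o, some e) =>
      if o = e then fmt02xB o ++ [' ']
      else fmt02xB o ++ '(' :: fmt02xB e ++ [')', ' ']
  | (none, none) => []   -- zip_longest never yields this

def DiffExpectResult_alt (output : String) (expect : String) : String × Int :=
  match strToIntArrayB output with
  | none => ("", 0)   -- int(tok, 16) raises in B too; excluded by Pre_
  | some ov =>
    match strToIntArrayB expect with
    | none => ("", 0)
    | some ev =>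
      let parts := (zipLongest ov ev).map pieceB
      let state : Int := if parts.any (fun p => PySem.Chars.isIn ['('] p) then 1 else 0
      (String.ofList parts.flatten, state)

-- ===== PRECONDITION & SPEC =====
-- every space-separated chunk of the stripped string must be a valid base-16 int literal
def validHexStr (s : String) : Bool :=
  let t := PySem.Chars.strip s.toList
  t.isEmpty || (PySem.Chars.splitOn t [' ']).all (fun tok => (PySem.Int.ofCharsBase? tok 16).isSome)

-- Pre_ excludes exactly the inputs on which int(tok, 16) inside StrToIntArray raises ValueError
def Pre_DiffExpectResult (output : String) (expect : String) : Prop :=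
  validHexStr output = true ∧ validHexStr expect = true
instance (output : String) (expect : String) : Decidable (Pre_DiffExpectResult output expect) := by unfold Pre_DiffExpectResult; infer_instance

def pvWitness_DiffExpectResult : String × String := ("01 2f ff", "1 30 ff")

def Spec_DiffExpectResult (output : String) (expect : String) (out : String × Int) : Prop := out = DiffExpectResult_alt output expect
instance (output : String) (expect : String) (out : String × Int) : Decidable (Spec_DiffExpectResult output expect out) := by unfold Spec_DiffExpectResult; infer_instance

-- ===== CLAIM (what is proved, stated in full; the proofs are below) =====
def Claim_equal_DiffExpectResult : Prop := ∀ (output : String) (expect : String), Dom_DiffExpectResult output expect → Pre_DiffExpectResult output expect → Spec_DiffExpectResult output expect (DiffExpectResult output expect)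


-- ===== LEMMAS AND PROOFS =====

-- a zip_longest pair marks a difference unless both sides are present and equal
def isDiffPair : Option Int × Option Int → Bool
  | (some o, some e) => decide (o ≠ e)
  | (none, none) => false
  | _ => true

theorem toHexRecB_eq (n : Nat) : toHexRecB n = toHexRec n := by
  induction n using Nat.strong_induction_on with
  | _ n ih =>
    match n with
    | 0 => rw [toHexRecB, toHexRec]
    | m+1 =>
      rw [toHexRecB, toHexRec, ih _ (Nat.div_lt_self (Nat.succ_pos m) (by norm_num))]

theorem fmt02xB_eq (v : Int) : fmt02xB v = fmt02x v := by
  unfold fmt02xB fmt02x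
  rw [toHexRecB_eq]

theorem strToIntArrayB_eq (s : String) : strToIntArrayB s = strToIntArray s := rfl

theorem digitChar_ne_paren (n : Nat) (h : n < 16) : Nat.digitChar n ≠ '(' := by
  interval_cases n <;> decide

theorem paren_not_mem_toHexRec (n : Nat) : '(' ∉ toHexRec n := by
  induction n using Nat.strong_induction_on with
  | _ n ih =>
    match n with
    | 0 => simp [toHexRec]
    | m+1 =>
      rw [toHexRec]
      simp only [List.mem_append, List.mem_singleton, not_or]
      refine ⟨ih _ (Nat.div_lt_self (Nat.succ_pos m) (by norm_num)), fun h => ?_⟩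
      exact digitChar_ne_paren _ (Nat.mod_lt _ (by norm_num)) h.symm

theorem mem_zfill (c : Char) (cs : List Char) (w : Int) (h : c ∈ PySem.Chars.zfill cs w) :
    c ∈ cs ∨ c = '0' := by
  cases cs with
  | nil =>
    unfold PySem.Chars.zfill at h
    split at h
    · exact Or.inl h
    · exact Or.inr (List.eq_of_mem_replicate h)
  | cons c1 rest =>
    unfold PySem.Chars.zfill at h
    split at h
    · exact Or.inl h
    · split at h
      · split at h <;> simp_all [List.mem_replicate] <;> tauto
      · simp_all

theorem paren_not_mem_fmt02x (v : Int) : '(' ∉ fmt02x v := by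
  intro h
  rcases mem_zfill _ _ _ h with h | h
  · rcases List.mem_append.1 h with h | h
    · split at h <;> simp_all
    · split at h
      · simp at h
      · exact paren_not_mem_toHexRec _ h
  · exact absurd h (by decide)

theorem isIn_paren_eq_mem (p : List Char) :
    PySem.Chars.isIn ['('] p = decide ('(' ∈ p) := by
  by_cases h : '(' ∈ p
  · simp only [h, decide_true]
    exact (PySem.Chars.isIn_iff_infix _ _).mpr ((List.singleton_infix_iff '(' p).mpr h)
  · simp only [h, decide_false]
    by_contra hne
    have := (PySem.Chars.isIn_iff_infix ['('] p).mp (by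
      cases hb : PySem.Chars.isIn ['('] p
      · exact absurd hb hne
      · rfl)
    exact h ((List.singleton_infix_iff '(' p).mp this)

theorem isIn_paren_pieceB (p : Option Int × Option Int) :
    PySem.Chars.isIn ['('] (pieceB p) = isDiffPair p := by
  rcases p with ⟨o, e⟩
  rcases o with _ | o <;> rcases e with _ | e <;>
    simp only [pieceB, isDiffPair, isIn_paren_eq_mem, fmt02xB_eq]
  · decide
  · simp
  · simp [paren_not_mem_fmt02x]
  · by_cases he : o = e
    · simp [he, paren_not_mem_fmt02x]
    · simp [he, paren_not_mem_fmt02x]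

-- peeling the first index off a foldl over List.range
theorem foldl_range_shift (f g : List Char × Int → Nat → List Char × Int) (n : Nat)
    (init : List Char × Int) (hfg : ∀ b i, f b (i+1) = g b i) :
    (List.range (n+1)).foldl f init = (List.range n).foldl g (f init 0) := by
  rw [List.range_succ_eq_map, List.foldl_cons, List.foldl_map]
  congr 1
  funext b i
  exact hfg b i

theorem stepLE_shift_nil (e : Int) (es : List Int) (b : List Char × Int) (i : Nat) :
    stepLE [] (e :: es) b (i+1) = stepLE [] es b i := by
  simp [stepLE]

theorem stepLE_shift_cons (o e : Int) (os es : List Int) (b : List Char × Int) (i : Nat) :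
    stepLE (o :: os) (e :: es) b (i+1) = stepLE os es b i := by
  simp only [stepLE, List.getD_cons_succ, List.length_cons, Nat.add_le_add_iff_right]

theorem stepGT_shift_nil (o : Int) (os : List Int) (b : List Char × Int) (i : Nat) :
    stepGT (o :: os) [] b (i+1) = stepGT os [] b i := by
  simp [stepGT]

theorem stepGT_shift_cons (o e : Int) (os es : List Int) (b : List Char × Int) (i : Nat) :
    stepGT (o :: os) (e :: es) b (i+1) = stepGT os es b i := by
  simp only [stepGT, List.getD_cons_succ, List.length_cons, Nat.add_le_add_iff_right]

theorem loopLE (ov ev : List Int) (acc : List Char) (st : Int) (h : ov.length ≤ ev.length) :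
    (List.range ev.length).foldl (stepLE ov ev) (acc, st)
      = (acc ++ ((zipLongest ov ev).map pieceB).flatten,
         if (zipLongest ov ev).any isDiffPair then 1 else st) := by
  induction ev generalizing ov acc st with
  | nil =>
    have : ov = [] := List.eq_nil_of_length_eq_zero (Nat.le_zero.mp h)
    subst this
    simp [zipLongest]
  | cons e es ih =>
    cases ov with
    | nil =>
      rw [List.length_cons, foldl_range_shift _ _ _ _ (stepLE_shift_nil e es)]
      have h0 : stepLE [] (e :: es) (acc, st) 0
          = (acc ++ '(' :: fmt02x e ++ [')', ' '], 1) := by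
        simp [stepLE]
      rw [h0, ih [] _ _ (by simp)]
      simp [zipLongest, pieceB, isDiffPair, fmt02xB_eq]
    | cons o os =>
      rw [List.length_cons, foldl_range_shift _ _ _ _ (stepLE_shift_cons o e os es)]
      by_cases hoe : o = e
      · subst hoe
        have h0 : stepLE (o :: os) (o :: es) (acc, st) 0
            = (acc ++ fmt02x o ++ [' '], st) := by
          simp [stepLE]
        rw [h0, ih os _ _ (by simpa using h)]
        have hz : zipLongest (o :: os) (o :: es) = (some o, some o) :: zipLongest os es := by rw [zipLongest]
        rw [hz]
        rw [List.map_cons, List.flatten_cons, List.any_cons,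
            show isDiffPair (some o, some o) = false by simp [isDiffPair], Bool.false_or]
        simp [pieceB, fmt02xB_eq]
      · have h0 : stepLE (o :: os) (e :: es) (acc, st) 0
            = (acc ++ fmt02x o ++ '(' :: fmt02x e ++ [')', ' '], 1) := by
          simp [stepLE, hoe]
        rw [h0, ih os _ _ (by simpa using h)]
        simp [zipLongest, pieceB, isDiffPair, hoe, fmt02xB_eq]

theorem loopGT (ov ev : List Int) (acc : List Char) (st : Int) (h : ev.length < ov.length) :
    (List.range ov.length).foldl (stepGT ov ev) (acc, st)
      = (acc ++ ((zipLongest ov ev).map pieceB).flatten,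
         if (zipLongest ov ev).any isDiffPair then 1 else st) := by
  induction ov generalizing ev acc st with
  | nil => simp at h
  | cons o os ih =>
    cases ev with
    | nil =>
      rw [List.length_cons, foldl_range_shift _ _ _ _ (stepGT_shift_nil o os)]
      have h0 : stepGT (o :: os) [] (acc, st) 0
          = (acc ++ fmt02x o ++ ['(', 'N', '/', 'A', ')', ' '], 1) := by
        simp [stepGT]
      rw [h0]
      by_cases hos : os = []
      · subst hos; simp [zipLongest, pieceB, isDiffPair, fmt02xB_eq]
      · have hlen : ([] : List Int).length < os.length := by
          cases os with | nil => exact absurd rfl hos | cons _ _ => simp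
        rw [ih [] _ _ hlen]
        simp [zipLongest, pieceB, isDiffPair, fmt02xB_eq]
    | cons e es =>
      rw [List.length_cons, foldl_range_shift _ _ _ _ (stepGT_shift_cons o e os es)]
      by_cases hoe : o = e
      · subst hoe
        have h0 : stepGT (o :: os) (o :: es) (acc, st) 0
            = (acc ++ fmt02x o ++ [' '], st) := by
          simp [stepGT]
        rw [h0, ih es _ _ (by simpa using h)]
        have hz : zipLongest (o :: os) (o :: es) = (some o, some o) :: zipLongest os es := by rw [zipLongest]
        rw [hz]
        rw [List.map_cons, List.flatten_cons, List.any_cons,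
            show isDiffPair (some o, some o) = false by simp [isDiffPair], Bool.false_or]
        simp [pieceB, fmt02xB_eq]
      · have h0 : stepGT (o :: os) (e :: es) (acc, st) 0
            = (acc ++ fmt02x o ++ '(' :: fmt02x e ++ [')', ' '], 1) := by
          simp [stepGT, hoe]
        rw [h0, ih es _ _ (by simpa using h)]
        simp [zipLongest, pieceB, isDiffPair, hoe, fmt02xB_eq]

-- ===== VERDICT (by name: the statement is the Claim_ definition above) =====
theorem DiffExpectResult_spec : Claim_equal_DiffExpectResult := by
  intro output expect _ _
  unfold Spec_DiffExpectResult DiffExpectResult DiffExpectResult_alt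
  simp only [strToIntArrayB_eq]
  cases ho : strToIntArray output with
  | none => simp
  | some ov =>
    cases he : strToIntArray expect with
    | none => simp
    | some ev =>
      simp only
      by_cases hle : ov.length ≤ ev.length
      · rw [if_pos hle, loopLE ov ev [] 0 hle]
        simp only [List.nil_append, List.any_map, Function.comp_def, isIn_paren_pieceB]
      · rw [if_neg hle, loopGT ov ev [] 0 (by omega)]
        simp only [List.nil_append, List.any_map, Function.comp_def, isIn_paren_pieceB]
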